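-- pv_equiv track=rewrite | github.com/gmnr/advent-of-code | 2021/20/day20.py | nb8
-- ===== SOURCE A (Python) =====
-- def nb8(coord):
--     x, y = coord
--     return sorted(
--         [
--             (x + dx, y + dy)
--             for dx, dy in [
--                 (1, 0),
--                 (1, -1),
--                 (0, -1),
--                 (-1, -1),
--                 (0, 0),
--                 (-1, 0),
--                 (-1, 1),
--                 (0, 1),
--                 (1, 1),
--             ]
--         ],
--         key=lambda x: (x[1], x[0]),
--     )
-- ===== SOURCE B (Python) =====
-- def nb8(coord):
--     x, y = coord
--     return [(x - 1 + k % 3, y - 1 + k // 3) for k in range(9)]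
-- ===== Notes on version B (the rewrite author's own statement) =====
-- stated objective: idiomatic
-- what changed: B replaces A's hand-written offset list plus sort by a single flat loop over cell indices 0..8, decoding each index arithmetically as (k%3-1, k//3-1), which enumerates the neighborhood directly in the (y,x) order A sorts into.
import Mathlib
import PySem

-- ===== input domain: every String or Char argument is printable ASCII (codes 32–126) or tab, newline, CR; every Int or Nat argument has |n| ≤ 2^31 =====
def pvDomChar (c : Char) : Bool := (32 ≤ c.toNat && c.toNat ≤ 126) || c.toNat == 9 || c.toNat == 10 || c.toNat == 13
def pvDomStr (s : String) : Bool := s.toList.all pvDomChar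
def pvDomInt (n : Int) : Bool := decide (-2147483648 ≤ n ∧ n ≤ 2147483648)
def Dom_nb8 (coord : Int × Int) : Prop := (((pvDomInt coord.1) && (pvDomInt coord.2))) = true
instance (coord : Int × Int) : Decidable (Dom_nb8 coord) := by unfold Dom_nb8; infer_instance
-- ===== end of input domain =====

-- B enumerates the 9 cells by a single flat index loop, decoding (k%3-1, k//3-1);
-- this yields the (y,x) order directly, so A's offset list and sort call disappear (objective: idiomatic).

-- ===== PORT A =====
def nb8 (coord : Int × Int) : List (Int × Int) :=
  let x := coord.1
  let y := coord.2
  PySem.List.sorted2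
    ([((1:Int), (0:Int)), (1, -1), (0, -1), (-1, -1), (0, 0), (-1, 0), (-1, 1), (0, 1), (1, 1)].map
      (fun d => (x + d.1, y + d.2)))
    (fun p => p.2) (fun p => p.1) false

-- ===== PORT B =====
def nb8_alt (coord : Int × Int) : List (Int × Int) :=
  let x := coord.1
  let y := coord.2
  (PySem.List.pyRange 0 9 1).map (fun k => (x - 1 + PySem.Int.mod k 3, y - 1 + PySem.Int.floordiv k 3))

-- ===== PRECONDITION & SPEC =====
def Spec_nb8 (coord : Int × Int) (out : List (Int × Int)) : Prop := out = nb8_alt coord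
instance (coord : Int × Int) (out : List (Int × Int)) : Decidable (Spec_nb8 coord out) := by unfold Spec_nb8; infer_instance

-- ===== CLAIM (what is proved, stated in full; the proofs are below) =====
def Claim_equal_nb8 : Prop := ∀ (coord : Int × Int), Dom_nb8 coord → Spec_nb8 coord (nb8 coord)

-- ===== LEMMAS AND PROOFS =====

-- ===== VERDICT (by name: the statement is the Claim_ definition above) =====
theorem nb8_spec : Claim_equal_nb8 := by
  intro c _
  obtain ⟨x, y⟩ := c
  have h1 : ¬ (y + 1 + 1 < y) := by omega
  have h2 : ¬ (x + 1 + 1 < x) := by omega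
  unfold Spec_nb8
  simp [nb8, nb8_alt, PySem.List.sorted2, PySem.List.insertBy, PySem.List.pyRange,
    PySem.Int.mod, PySem.Int.floordiv, h1, h2]
  simp [List.range_succ]
  omega
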